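-- pv_equiv track=rewrite | github.com/TheOneTrueNiz/Versatile_Embedded_Reasoning_Agent | src/safety/safety_validator.py | _has_command_chaining
-- ===== SOURCE A (Python) =====
-- def _has_command_chaining(command: str) -> bool:
--     """Detect command chaining operators"""
--     # Look for chaining outside of quotes
--     chain_operators = [';', '&&', '||', '|']
--
--     # Simple heuristic: if any operator present outside quotes
--     in_quotes = False
--     quote_char = None
--
--     for i, char in enumerate(command):
--         if char in ['"', "'"]:
--             if not in_quotes:
--                 in_quotes = True
--                 quote_char = char
--             elif char == quote_char:
--                 in_quotes = False
--                 quote_char = None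
--         elif not in_quotes:
--             if char in chain_operators:
--                 return True
--             if i < len(command) - 1 and command[i:i+2] in ['&&', '||']:
--                 return True
--
--     return False
-- ===== SOURCE B (Python) =====
-- def _has_command_chaining(command: str) -> bool:
--     # Quote state machine that collects contiguous outside-quote runs as
--     # segments, then checks each segment for a chaining operator.
--     segments = []
--     cur = []
--     quote_char = None
--     for ch in command:
--         if ch in ('"', "'"):
--             if quote_char is None:
--                 segments.append(''.join(cur))
--                 cur = []
--                 quote_char = ch
--             elif ch == quote_char:
--                 quote_char = None
--         elif quote_char is None:
--             cur.append(ch)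
--     segments.append(''.join(cur))
--     return any(op in seg for seg in segments for op in (';', '|', '&&'))
-- ===== Notes on version B (the rewrite author's own statement) =====
-- stated objective: simpler
-- what changed: Instead of testing operators inline at each position (with an enumerate-indexed two-character slice), B runs the same quote state machine only to split the command into outside-quote segments and then checks the collected segments for ';', '|' or '&&' in one final any().
import Mathlib
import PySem

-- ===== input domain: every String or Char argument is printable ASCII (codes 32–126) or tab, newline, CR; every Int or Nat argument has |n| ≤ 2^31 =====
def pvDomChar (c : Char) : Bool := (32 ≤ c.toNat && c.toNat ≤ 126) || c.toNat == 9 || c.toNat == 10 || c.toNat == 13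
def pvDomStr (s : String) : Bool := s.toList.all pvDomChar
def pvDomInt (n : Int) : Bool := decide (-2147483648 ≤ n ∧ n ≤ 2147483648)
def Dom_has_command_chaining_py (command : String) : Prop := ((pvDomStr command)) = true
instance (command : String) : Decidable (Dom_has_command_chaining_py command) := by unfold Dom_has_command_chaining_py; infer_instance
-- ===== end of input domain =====

-- B keeps A's quote state machine but collects the outside-quote runs into segments
-- and scans each segment for an operator once at the end (simpler decomposition, same cost).


-- ===== PORT A =====
-- A's loop, recursing on the remaining characters; `command[i:i+2]` at the current
-- position is exactly `(c :: rest).take 2` and `i < len(command) - 1` is `rest ≠ []`.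
def hccGoA : List Char → Bool → Option Char → Bool
  | [], _, _ => false
  | c :: rest, inq, qc =>
    if c = '"' ∨ c = '\'' then
      if !inq then hccGoA rest true (some c)
      else if qc = some c then hccGoA rest false none
      else hccGoA rest inq qc
    else if !inq then
      -- char in [';', '&&', '||', '|'] : a 1-char string only equals ';' or '|'
      if c = ';' ∨ c = '|' then true
      -- i < len(command) - 1 and command[i:i+2] in ['&&', '||']
      else if rest ≠ [] ∧ ((c :: rest).take 2 = ['&', '&'] ∨ (c :: rest).take 2 = ['|', '|']) then true
      else hccGoA rest inq qc
    else hccGoA rest inq qc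

def has_command_chaining_py (command : String) : Bool :=
  hccGoA command.toList false none

-- ===== PORT B =====
-- B's loop: the same quote state machine, but it accumulates the current
-- contiguous outside-quote run `cur` and flushes it into `segs` when a quote opens.
def hccGoB : List Char → Option Char → List Char → List (List Char) → List (List Char)
  | [], _, cur, segs => segs ++ [cur]
  | c :: rest, qc, cur, segs =>
    if c = '"' ∨ c = '\'' then
      match qc with
      | none => hccGoB rest (some c) [] (segs ++ [cur])
      | some q => if c = q then hccGoB rest none cur segs else hccGoB rest (some q) cur segs
    else
      match qc with
      | none => hccGoB rest none (cur ++ [c]) segs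
      | some q => hccGoB rest (some q) cur segs

-- any(op in seg for seg in segments for op in (';', '|', '&&'))
def segHasOp (seg : List Char) : Bool :=
  PySem.Chars.isIn [';'] seg || PySem.Chars.isIn ['|'] seg || PySem.Chars.isIn ['&', '&'] seg

def has_command_chaining_py_alt (command : String) : Bool :=
  (hccGoB command.toList none [] []).any segHasOp

-- ===== PRECONDITION & SPEC =====
def Spec_has_command_chaining_py (command : String) (out : Bool) : Prop := out = has_command_chaining_py_alt command
instance (command : String) (out : Bool) : Decidable (Spec_has_command_chaining_py command out) := by unfold Spec_has_command_chaining_py; infer_instance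

-- ===== CLAIM (what is proved, stated in full; the proofs are below) =====
def Claim_equal_has_command_chaining_py : Prop := ∀ (command : String), Dom_has_command_chaining_py command → Spec_has_command_chaining_py command (has_command_chaining_py command)

-- ===== LEMMAS AND PROOFS =====

-- Boolean scan equivalent to '&&' substring membership, convenient for induction
def pairScan : List Char → Bool
  | x :: y :: t => (x = '&' && y = '&') || pairScan (y :: t)
  | _ => false

lemma isIn_singleton (c : Char) (l : List Char) : PySem.Chars.isIn [c] l = l.contains c := by
  rw [Bool.eq_iff_iff, PySem.Chars.isIn_iff_infix, List.singleton_infix_iff]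
  simp

lemma pairScan_iff (l : List Char) : pairScan l = true ↔ ['&','&'] <:+: l := by
  induction l using pairScan.induct with
  | case1 x y t ih =>
      simp [pairScan, List.infix_cons_iff, ih, List.cons_prefix_cons]
      tauto
  | case2 l h =>
      cases l with
      | nil => simp [pairScan]
      | cons x t =>
        cases t with
        | nil =>
          simp [pairScan]
          intro hi
          have := hi.length_le
          simp at this
        | cons y u => exact absurd rfl (h x y u)

lemma isIn_amp (l : List Char) : PySem.Chars.isIn ['&','&'] l = pairScan l := by
  rw [Bool.eq_iff_iff, PySem.Chars.isIn_iff_infix, ← pairScan_iff]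

lemma pairScan_append (l : List Char) (c : Char) :
    pairScan (l ++ [c]) = (pairScan l || (l.getLast? == some '&' && decide (c = '&'))) := by
  induction l using pairScan.induct with
  | case1 x y t ih =>
      cases t with
      | nil =>
        simp [pairScan] at *
        by_cases hx : x = '&' <;> by_cases hy : y = '&' <;> by_cases hc : c = '&' <;> simp_all
      | cons z u =>
        simp only [List.cons_append, pairScan] at ih ⊢
        rw [ih]
        simp [List.getLast?_cons_cons, Bool.or_assoc]
  | case2 l h =>
      cases l with
      | nil => simp [pairScan]
      | cons x t =>
        cases t with
        | nil =>
          simp [pairScan]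
          by_cases hx : x = '&' <;> by_cases hc : c = '&' <;> simp_all
        | cons y u => exact absurd rfl (h x y u)

lemma segHasOp_nil : segHasOp [] = false := by decide

lemma segHasOp_append (l : List Char) (c : Char) :
    segHasOp (l ++ [c]) =
      (segHasOp l || decide (c = ';') || decide (c = '|')
        || (l.getLast? == some '&' && decide (c = '&'))) := by
  simp only [segHasOp, isIn_singleton, isIn_amp, pairScan_append, List.contains_append]
  cases h1 : l.contains ';' <;> cases h2 : l.contains '|' <;> cases h3 : pairScan l <;>
    cases h4 : (l.getLast? == some '&') <;>
    by_cases hc : c = ';' <;> by_cases hd : c = '|' <;> by_cases he : c = '&' <;> simp_all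
  all_goals exact ⟨fun h => hc h.symm, fun h => hd h.symm⟩

lemma hcc_inv : ∀ (cs : List Char) (qc : Option Char) (cur : List Char)
    (segs : List (List Char)), (qc.isSome → cur = []) →
    (hccGoB cs qc cur segs).any segHasOp =
      (segs.any segHasOp || segHasOp cur
        || (cur.getLast? == some '&' && cs.head? == some '&')
        || hccGoA cs qc.isSome qc) := by
  intro cs
  induction cs with
  | nil =>
    intro qc cur segs _
    simp [hccGoB, hccGoA]
  | cons c rest ih =>
    intro qc cur segs hqc
    by_cases hq : c = '"' ∨ c = '\''
    · have hamp : (c == '&') = false := by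
        rcases hq with h | h <;> simp [h]
      cases qc with
      | none =>
        simp only [hccGoB, hccGoA, hq, if_pos, Option.isSome_none, Bool.not_false]
        rw [ih (some c) [] (segs ++ [cur]) (by simp)]
        simp [segHasOp_nil, List.any_append, hamp, Bool.or_assoc]
      | some q =>
        have hcur : cur = [] := hqc rfl
        subst hcur
        by_cases hcq : c = q
        · subst hcq
          simp only [hccGoB, hccGoA]
          rw [if_pos hq, if_pos hq]
          simp only [if_true]
          rw [ih none [] segs (by simp)]
          simp [segHasOp_nil]
        · simp only [hccGoB, hccGoA]
          rw [if_pos hq, if_pos hq, if_neg hcq]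
          rw [ih (some q) [] segs (by simp)]
          simp [segHasOp_nil, Ne.symm hcq]
    · cases qc with
      | none =>
        simp only [hccGoB, hccGoA, hq, Option.isSome_none, Bool.not_false, if_true, if_false]
        rw [ih none (cur ++ [c]) segs (by simp)]
        rw [segHasOp_append]
        simp only [List.getLast?_concat]
        cases rest with
        | nil =>
          simp only [hccGoA, List.head?]
          by_cases hc : c = ';' <;> by_cases hd : c = '|' <;> by_cases he : c = '&' <;>
            cases hs : segHasOp cur <;> cases hg : (cur.getLast? == some '&') <;> simp_all
        | cons z u =>
          by_cases hc : c = ';' <;> by_cases hd : c = '|' <;> by_cases he : c = '&' <;>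
            by_cases hz : z = '&' <;>
            cases hs : segHasOp cur <;> cases hg : (cur.getLast? == some '&') <;>
            cases hA : hccGoA (z :: u) false none <;> simp_all
          all_goals (rw [show (c == '&') = false from beq_eq_false_iff_ne.mpr he]; simp)
      | some q =>
        have hcur : cur = [] := hqc rfl
        subst hcur
        simp only [hccGoB, hccGoA, hq, Option.isSome_some, Bool.not_true, if_false]
        rw [ih (some q) [] segs (by simp)]
        simp [segHasOp_nil]

-- ===== VERDICT (by name: the statement is the Claim_ definition above) =====
theorem has_command_chaining_py_spec : Claim_equal_has_command_chaining_py := by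
  intro command _
  show _ = _
  unfold has_command_chaining_py has_command_chaining_py_alt
  rw [hcc_inv command.toList none [] [] (by simp)]
  simp [segHasOp_nil]
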